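-- pv_equiv track=rewrite | github.com/lmun/competitiveProgramingSolutions | projectEuler/347.py | copa
-- ===== SOURCE A (Python) =====
-- m = 10**7
--
-- def copa(a, b):
--     mu = a*b
--     res = 0
--     while mu <= m:
--         me = mu
--         while me <= m:
--             if me > res:
--                 res = me
--             me *= b
--         mu *= a
--     return res
-- ===== SOURCE B (Python) =====
-- m = 10**7
--
-- def copa(a, b):
--     # Table-based: precompute the powers of a and of b once, then take the
--     # max over products of one a-power and one b-power lying in (0, m].
--     if a * b > m:
--         return 0
--     pas, p = [], a
--     while -m <= p <= m:
--         pas.append(p)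
--         p *= a
--     pbs, q = [], b
--     while -m <= q <= m:
--         pbs.append(q)
--         q *= b
--     best = 0
--     for x in pas:
--         for y in pbs:
--             v = x * y
--             if 0 < v <= m and best < v:
--                 best = v
--     return best
-- ===== Notes on version B (the rewrite author's own statement) =====
-- stated objective: alternative
-- what changed: B precomputes the two power tables [a,a^2,...] and [b,b^2,...] (bounded by |p| <= m) once and takes the max over products of one entry from each lying in (0, m], replacing A's nested dependent while-loops with a running accumulator.
import Mathlib
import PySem

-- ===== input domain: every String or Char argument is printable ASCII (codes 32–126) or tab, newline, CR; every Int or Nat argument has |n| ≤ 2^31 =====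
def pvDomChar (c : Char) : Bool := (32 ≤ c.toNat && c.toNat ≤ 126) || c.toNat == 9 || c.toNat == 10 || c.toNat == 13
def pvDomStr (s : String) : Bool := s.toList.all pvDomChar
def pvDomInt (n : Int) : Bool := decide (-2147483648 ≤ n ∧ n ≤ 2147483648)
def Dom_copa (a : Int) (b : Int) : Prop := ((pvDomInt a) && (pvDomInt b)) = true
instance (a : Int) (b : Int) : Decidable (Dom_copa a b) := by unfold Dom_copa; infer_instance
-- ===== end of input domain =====

-- B precomputes the two power tables once and maximises over their products in (0, m];
-- objective: alternative (same asymptotic cost, a table-and-filter pass instead of nested dependent while-loops).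

def pvM : Int := 10000000

-- ===== PORT A =====
-- inner while: 'while me <= m: if me > res: res = me; me *= b'  (fuel makes the loop total; 64 ≫ the ≤ 26 iterations any input of Pre_ needs)
def copaInner (b : Int) : Nat → Int → Int → Int
  | 0, _, res => res
  | f+1, me, res => if me ≤ pvM then copaInner b f (me*b) (if res < me then me else res) else res

-- outer while: 'while mu <= m: <inner>; mu *= a'
def copaOuter (a b : Int) : Nat → Int → Int → Int
  | 0, _, res => res
  | f+1, mu, res => if mu ≤ pvM then copaOuter a b f (mu*a) (copaInner b 64 mu res) else res

def copa (a : Int) (b : Int) : Int := copaOuter a b 64 (a*b) 0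

-- ===== PORT B =====
-- 'p = x; while -m <= p <= m: append p; p *= x'
def powersAux (c : Int) : Nat → Int → List Int
  | 0, _ => []
  | f+1, p => if -pvM ≤ p ∧ p ≤ pvM then p :: powersAux c f (p*c) else []

def copa_alt (a : Int) (b : Int) : Int :=
  if pvM < a*b then 0
  else
    let pas := powersAux a 64 a
    let pbs := powersAux b 64 b
    pas.foldl (fun best x => pbs.foldl (fun best y =>
      if 0 < x*y ∧ x*y ≤ pvM ∧ best < x*y then x*y else best) best) 0

-- ===== PRECONDITION & SPEC =====
-- Pre_ is exactly the set of inputs on which the Python A terminates: when a*b ≤ m, the outer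
-- loop never exits unless sign-compatible growth makes mu eventually exceed m, which happens
-- exactly when a and b are both ≥ 2 or both ≤ -2; everywhere else A loops forever.
def Pre_copa (a : Int) (b : Int) : Prop := pvM < a*b ∨ (2 ≤ a ∧ 2 ≤ b) ∨ (a ≤ -2 ∧ b ≤ -2)
instance (a : Int) (b : Int) : Decidable (Pre_copa a b) := by unfold Pre_copa; infer_instance
def pvWitness_copa : Int × Int := (2, 3)
def Spec_copa (a : Int) (b : Int) (out : Int) : Prop := out = copa_alt a b
instance (a : Int) (b : Int) (out : Int) : Decidable (Spec_copa a b out) := by unfold Spec_copa; infer_instance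

-- ===== CLAIM (what is proved, stated in full; the proofs are below) =====
def Claim_equal_copa : Prop := ∀ (a : Int) (b : Int), Dom_copa a b → Pre_copa a b → Spec_copa a b (copa a b)

-- ===== LEMMAS AND PROOFS =====

-- the list of values visited by a 'while x <= m: …; x *= c' loop
def chainA (c : Int) : Nat → Int → List Int
  | 0, _ => []
  | f+1, x => if x ≤ pvM then x :: chainA c f (x*c) else []

theorem chainA_succ (c : Int) (f : Nat) (x : Int) :
    chainA c (f+1) x = if x ≤ pvM then x :: chainA c f (x*c) else [] := rfl

theorem copaInner_eq (b : Int) (f : Nat) (me res : Int) :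
    copaInner b f me res = List.foldl max res (chainA b f me) := by
  induction f generalizing me res with
  | zero => rfl
  | succ f ih =>
    rw [show copaInner b (f+1) me res
        = (if me ≤ pvM then copaInner b f (me*b) (if res < me then me else res) else res) from rfl,
      chainA_succ]
    by_cases h : me ≤ pvM
    · rw [if_pos h, if_pos h, ih, List.foldl_cons]
      congr 1
      rcases le_total res me with h2 | h2
      · rw [max_eq_right h2]; split <;> omega
      · rw [max_eq_left h2]; split <;> omega
    · rw [if_neg h, if_neg h]; rfl

theorem copaOuter_eq (a b : Int) (f : Nat) (mu res : Int) :
    copaOuter a b f mu res =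
      List.foldl (fun r u => List.foldl max r (chainA b 64 u)) res (chainA a f mu) := by
  induction f generalizing mu res with
  | zero => rfl
  | succ f ih =>
    rw [show copaOuter a b (f+1) mu res
        = (if mu ≤ pvM then copaOuter a b f (mu*a) (copaInner b 64 mu res) else res) from rfl,
      chainA_succ]
    by_cases h : mu ≤ pvM
    · rw [if_pos h, if_pos h, ih, copaInner_eq, List.foldl_cons]
    · rw [if_neg h, if_neg h]; rfl

theorem foldl_foldl_max {α : Type} (g : α → List Int) (l : List α) (res : Int) :
    List.foldl (fun r u => List.foldl max r (g u)) res l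
      = List.foldl max res (l.flatMap g) := by
  induction l generalizing res with
  | nil => rfl
  | cons x xs ih => simp [List.foldl_append, ih]

theorem foldl_filtmax (x : Int) (l : List Int) (res : Int) :
    List.foldl (fun best y => if 0 < x*y ∧ x*y ≤ pvM ∧ best < x*y then x*y else best) res l
      = List.foldl max res ((l.map (fun y => x*y)).filter (fun v => 0 < v ∧ v ≤ pvM)) := by
  induction l generalizing res with
  | nil => rfl
  | cons y ys ih =>
    rw [List.foldl_cons, List.map_cons, List.filter_cons]
    by_cases h : 0 < x*y ∧ x*y ≤ pvM
    · rw [decide_eq_true h, if_pos rfl, ih, List.foldl_cons]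
      congr 1
      obtain ⟨h1, h2⟩ := h
      rcases le_total res (x*y) with h3 | h3
      · rw [max_eq_right h3]; split <;> omega
      · rw [max_eq_left h3]; split <;> omega
    · simp only [decide_eq_false h, Bool.false_eq_true, if_false]
      rw [ih]
      congr 1
      split <;> omega

-- the two candidate lists
def pvLA (a b : Int) : List Int := (chainA a 64 (a*b)).flatMap (chainA b 64)
def pvLB (a b : Int) : List Int :=
  (powersAux a 64 a).flatMap (fun x =>
    ((powersAux b 64 b).map (fun y => x*y)).filter (fun v => 0 < v ∧ v ≤ pvM))

theorem copa_eq_LA (a b : Int) : copa a b = List.foldl max 0 (pvLA a b) := by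
  unfold copa pvLA
  rw [copaOuter_eq, foldl_foldl_max]

theorem copa_alt_eq_LB (a b : Int) (h : ¬ pvM < a*b) :
    copa_alt a b = List.foldl max 0 (pvLB a b) := by
  unfold copa_alt pvLB
  rw [if_neg h]
  simp only
  rw [show (fun best x => List.foldl (fun best y =>
        if 0 < x*y ∧ x*y ≤ pvM ∧ best < x*y then x*y else best) best (powersAux b 64 b))
      = (fun best x => List.foldl max best
          (((powersAux b 64 b).map (fun y => x*y)).filter (fun v => 0 < v ∧ v ≤ pvM))) from
    funext fun best => funext fun x => foldl_filtmax x _ best]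
  rw [foldl_foldl_max]

-- membership characterisations
theorem chainA_sound {c : Int} {f : Nat} {x v : Int} (h : v ∈ chainA c f x) :
    ∃ k : Nat, v = x * c^k ∧ v ≤ pvM := by
  induction f generalizing x with
  | zero => simp [chainA] at h
  | succ f ih =>
    rw [chainA_succ] at h
    split at h
    · rcases List.mem_cons.1 h with h | h
      · exact ⟨0, by simpa using h, by omega⟩
      · obtain ⟨k, hk, hle⟩ := ih h
        exact ⟨k+1, by rw [hk]; ring, hle⟩
    · simp at h

theorem chainA_complete {c : Int} (k : Nat) : ∀ (f : Nat) (x : Int), k < f →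
    (∀ k' ≤ k, x * c^k' ≤ pvM) → x * c^k ∈ chainA c f x := by
  induction k with
  | zero =>
    intro f x hf hpre
    match f, hf with
    | f+1, _ =>
      rw [chainA_succ, if_pos (by simpa using hpre 0 (le_refl 0))]
      simp
  | succ k ih =>
    intro f x hf hpre
    match f, hf with
    | f+1, hf =>
      rw [chainA_succ, if_pos (by simpa using hpre 0 (Nat.zero_le _))]
      refine List.mem_cons.2 (Or.inr ?_)
      have : x * c^(k+1) = (x*c) * c^k := by ring
      rw [this]
      exact ih f (x*c) (by omega) (fun k' hk' => by
        have := hpre (k'+1) (by omega)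
        calc (x*c) * c^k' = x * c^(k'+1) := by ring
          _ ≤ pvM := this)

theorem powersAux_succ (c : Int) (f : Nat) (p : Int) :
    powersAux c (f+1) p = if -pvM ≤ p ∧ p ≤ pvM then p :: powersAux c f (p*c) else [] := rfl

theorem powersAux_sound {c : Int} {f : Nat} {x v : Int} (h : v ∈ powersAux c f x) :
    ∃ k : Nat, v = x * c^k ∧ |v| ≤ pvM := by
  induction f generalizing x with
  | zero => simp [powersAux] at h
  | succ f ih =>
    rw [powersAux_succ] at h
    split at h
    · rcases List.mem_cons.1 h with h | h
      · exact ⟨0, by simpa using h, by rw [abs_le]; omega⟩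
      · obtain ⟨k, hk, hle⟩ := ih h
        exact ⟨k+1, by rw [hk]; ring, hle⟩
    · simp at h

theorem powersAux_complete {c : Int} (k : Nat) : ∀ (f : Nat) (x : Int), k < f →
    (∀ k' ≤ k, |x * c^k'| ≤ pvM) → x * c^k ∈ powersAux c f x := by
  induction k with
  | zero =>
    intro f x hf hpre
    match f, hf with
    | f+1, _ =>
      have h0 : |x| ≤ pvM := by simpa using hpre 0 (le_refl 0)
      rw [abs_le] at h0
      rw [powersAux_succ, if_pos (by omega)]
      simp
  | succ k ih =>
    intro f x hf hpre
    match f, hf with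
    | f+1, hf =>
      have h0 : |x| ≤ pvM := by simpa using hpre 0 (Nat.zero_le _)
      rw [abs_le] at h0
      rw [powersAux_succ, if_pos (by omega)]
      refine List.mem_cons.2 (Or.inr ?_)
      have : x * c^(k+1) = (x*c) * c^k := by ring
      rw [this]
      exact ih f (x*c) (by omega) (fun k' hk' => by
        have := hpre (k'+1) (by omega)
        calc |(x*c) * c^k'| = |x * c^(k'+1)| := by ring_nf
          _ ≤ pvM := this)

-- exponent bound: |c| ≥ 2 and |c|^k ≤ m force k ≤ 23 (< 64)
theorem exp_bound {c : Int} {k : Nat} (hc : 2 ≤ |c|) (h : |c|^k ≤ pvM) : k < 24 := by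
  by_contra hk
  rw [not_lt] at hk
  have h1 : (2:Int)^k ≤ |c|^k := pow_le_pow_left₀ (by norm_num) hc k
  have h2 : (2:Int)^24 ≤ (2:Int)^k := pow_le_pow_right₀ (by norm_num) (by omega)
  have : ((2:Int)^24 : Int) = 16777216 := by norm_num
  unfold pvM at h
  omega

theorem abs_pow_mono {c : Int} (hc : 1 ≤ |c|) {i j : Nat} (h : i ≤ j) : |c|^i ≤ |c|^j :=
  pow_le_pow_right₀ hc h

-- every positive element of A's visited list is a product of table entries kept by B
theorem LA_pos_sub_LB {a b v : Int} (ha : 2 ≤ |a|) (hb : 2 ≤ |b|)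
    (h : v ∈ pvLA a b) (hv : 0 < v) : v ∈ pvLB a b := by
  unfold pvLA at h
  obtain ⟨mu, hmu, hvmem⟩ := List.mem_flatMap.1 h
  obtain ⟨i0, hmueq, _⟩ := chainA_sound hmu
  obtain ⟨j0, hveq, hvle⟩ := chainA_sound hvmem
  have hveq' : v = a^(i0+1) * b^(j0+1) := by
    rw [hveq, hmueq]; ring
  have habs : |a|^(i0+1) * |b|^(j0+1) = v := by
    have : |v| = |a^(i0+1) * b^(j0+1)| := by rw [hveq']
    rw [abs_of_pos hv] at this
    rw [this, abs_mul, abs_pow, abs_pow]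
  have hpa1 : (1:Int) ≤ |a| := by omega
  have hpb1 : (1:Int) ≤ |b| := by omega
  have hbpos : 0 < |b|^(j0+1) := pow_pos (by omega) _
  have hapos : 0 < |a|^(i0+1) := pow_pos (by omega) _
  have hale : |a|^(i0+1) ≤ pvM := by
    nlinarith [one_le_pow₀ hpb1 (n := j0+1)]
  have hble : |b|^(j0+1) ≤ pvM := by
    nlinarith [one_le_pow₀ hpa1 (n := i0+1)]
  refine List.mem_flatMap.2 ⟨a^(i0+1), ?_, ?_⟩
  · have : a^(i0+1) = a * a^i0 := by ring
    rw [this]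
    refine powersAux_complete i0 64 a (by
      have := exp_bound ha hale; omega) (fun k' hk' => ?_)
    have : |a * a^k'| = |a|^(k'+1) := by rw [show a * a^k' = a^(k'+1) from by ring, abs_pow]
    rw [this]
    exact le_trans (abs_pow_mono hpa1 (by omega)) hale
  · refine List.mem_filter.2 ⟨?_, by
      simp only [decide_eq_true_eq]
      exact ⟨hv, hvle⟩⟩
    refine List.mem_map.2 ⟨b^(j0+1), ?_, by rw [← hveq']⟩
    have : b^(j0+1) = b * b^j0 := by ring
    rw [this]
    refine powersAux_complete j0 64 b (by
      have := exp_bound hb hble; omega) (fun k' hk' => ?_)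
    have : |b * b^k'| = |b|^(k'+1) := by rw [show b * b^k' = b^(k'+1) from by ring, abs_pow]
    rw [this]
    exact le_trans (abs_pow_mono hpb1 (by omega)) hble

-- every product B keeps is visited by A's loops
theorem LB_sub_LA {a b v : Int} (ha : 2 ≤ |a|) (hb : 2 ≤ |b|)
    (h : v ∈ pvLB a b) : v ∈ pvLA a b := by
  unfold pvLB at h
  obtain ⟨x, hx, hvmem⟩ := List.mem_flatMap.1 h
  obtain ⟨hvmap, hvcond⟩ := List.mem_filter.1 hvmem
  obtain ⟨y, hy, hveq⟩ := List.mem_map.1 hvmap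
  simp only [decide_eq_true_eq] at hvcond
  obtain ⟨hvpos, hvle⟩ := hvcond
  obtain ⟨i0, hxeq, hxle⟩ := powersAux_sound hx
  obtain ⟨j0, hyeq, hyle⟩ := powersAux_sound hy
  have hveq' : v = a^(i0+1) * b^(j0+1) := by
    rw [← hveq, hxeq, hyeq]; ring
  have habs : |a|^(i0+1) * |b|^(j0+1) = v := by
    have : |v| = |a^(i0+1) * b^(j0+1)| := by rw [hveq']
    rw [abs_of_pos hvpos] at this
    rw [this, abs_mul, abs_pow, abs_pow]
  have hpa1 : (1:Int) ≤ |a| := by omega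
  have hpb1 : (1:Int) ≤ |b| := by omega
  have hale : |a|^(i0+1) ≤ pvM := by
    nlinarith [one_le_pow₀ hpb1 (n := j0+1)]
  have hble : |b|^(j0+1) ≤ pvM := by
    nlinarith [one_le_pow₀ hpa1 (n := i0+1)]
  have hi24 : i0 + 1 < 24 := exp_bound ha hale
  have hj24 : j0 + 1 < 24 := exp_bound hb hble
  unfold pvLA
  refine List.mem_flatMap.2 ⟨a^(i0+1) * b, ?_, ?_⟩
  · have : a^(i0+1) * b = (a*b) * a^i0 := by ring
    rw [this]
    refine chainA_complete i0 64 (a*b) (by omega) (fun k' hk' => ?_)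
    have habsle : |(a*b) * a^k'| ≤ pvM := by
      have : |(a*b) * a^k'| = |a|^(k'+1) * |b| := by
        rw [show (a*b) * a^k' = a^(k'+1) * b from by ring, abs_mul, abs_pow]
      rw [this]
      calc |a|^(k'+1) * |b| ≤ |a|^(i0+1) * |b|^(j0+1) := by
            have h1 := abs_pow_mono hpa1 (show k'+1 ≤ i0+1 by omega)
            have h2 : |b| = |b|^1 := (pow_one _).symm
            have h3 : |b|^1 ≤ |b|^(j0+1) := abs_pow_mono hpb1 (by omega)
            nlinarith [pow_pos (show (0:Int) < |a| by omega) (k'+1),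
                       pow_pos (show (0:Int) < |b| by omega) 1]
        _ = v := habs
        _ ≤ pvM := hvle
    exact le_trans (le_abs_self _) habsle
  · have : v = (a^(i0+1) * b) * b^j0 := by rw [hveq']; ring
    rw [this]
    refine chainA_complete j0 64 (a^(i0+1)*b) (by omega) (fun k' hk' => ?_)
    have habsle : |(a^(i0+1)*b) * b^k'| ≤ pvM := by
      have : |(a^(i0+1)*b) * b^k'| = |a|^(i0+1) * |b|^(k'+1) := by
        rw [show (a^(i0+1)*b) * b^k' = a^(i0+1) * b^(k'+1) from by ring, abs_mul, abs_pow, abs_pow]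
      rw [this]
      calc |a|^(i0+1) * |b|^(k'+1) ≤ |a|^(i0+1) * |b|^(j0+1) := by
            have h3 := abs_pow_mono hpb1 (show k'+1 ≤ j0+1 by omega)
            nlinarith [pow_pos (show (0:Int) < |a| by omega) (i0+1)]
        _ = v := habs
        _ ≤ pvM := hvle
    exact le_trans (le_abs_self _) habsle

-- generic foldl-max facts
theorem foldl_max_init (l : List Int) (r : Int) : r ≤ List.foldl max r l := by
  induction l generalizing r with
  | nil => simp
  | cons x xs ih => exact le_trans (le_max_left r x) (ih _)

theorem foldl_max_mem_le {l : List Int} {v : Int} (h : v ∈ l) (r : Int) :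
    v ≤ List.foldl max r l := by
  induction l generalizing r with
  | nil => simp at h
  | cons x xs ih =>
    rcases List.mem_cons.1 h with h | h
    · subst h; exact le_trans (le_max_right r v) (foldl_max_init _ _)
    · exact ih h _
theorem foldl_max_cases (l : List Int) (r : Int) :
    List.foldl max r l = r ∨ List.foldl max r l ∈ l := by
  induction l generalizing r with
  | nil => simp
  | cons x xs ih =>
    rcases ih (max r x) with h | h
    · rcases max_choice r x with hm | hm
      · left; rw [List.foldl_cons, h, hm]
      · right; rw [List.foldl_cons, h, hm]; exact List.mem_cons_self
    · right
      rw [List.foldl_cons]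
      exact List.mem_cons_of_mem x h

theorem main_eq {a b : Int} (ha : 2 ≤ |a|) (hb : 2 ≤ |b|) (hab : ¬ pvM < a*b) :
    copa a b = copa_alt a b := by
  rw [copa_eq_LA, copa_alt_eq_LB a b hab]
  apply le_antisymm
  · rcases foldl_max_cases (pvLA a b) 0 with h | h
    · rw [h]; exact foldl_max_init _ _
    · by_cases hpos : 0 < List.foldl max 0 (pvLA a b)
      · exact foldl_max_mem_le (LA_pos_sub_LB ha hb h hpos) 0
      · exact le_trans (by omega) (foldl_max_init (pvLB a b) 0)
  · rcases foldl_max_cases (pvLB a b) 0 with h | h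
    · rw [h]; exact foldl_max_init _ _
    · exact foldl_max_mem_le (LB_sub_LA ha hb h) 0

-- ===== VERDICT (by name: the statement is the Claim_ definition above) =====
theorem copa_spec : Claim_equal_copa := by
  intro a b _ hpre
  unfold Spec_copa
  by_cases hab : pvM < a*b
  · have hA : copa a b = 0 := by
      unfold copa copaOuter
      rw [if_neg (by omega)]
    have hB : copa_alt a b = 0 := by
      unfold copa_alt
      rw [if_pos hab]
    rw [hA, hB]
  · have habs : 2 ≤ |a| ∧ 2 ≤ |b| := by
      unfold Pre_copa at hpre
      rcases hpre with h | ⟨h1, h2⟩ | ⟨h1, h2⟩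
      · exact absurd h hab
      · constructor <;> rw [le_abs] <;> omega
      · constructor <;> rw [le_abs] <;> omega
    exact main_eq habs.1 habs.2 hab
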